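-- pv_equiv track=rewrite | github.com/xiezhq/ISEScan | tools.py | ncopyByCutoff
-- ===== SOURCE A (Python) =====
-- import itertools
--
-- def ncopyByCutoff(ilist, cutoff=0):
-- 	ilist.sort()
-- 	gs = itertools.groupby(ilist)
-- 	windows = {}
-- 	kgs = []
-- 	for k,g in gs:
-- 		# requirement: k >= cutoff
-- 		if k <= cutoff:
-- 			start = 1
-- 		else:
-- 			start = k - cutoff
-- 		end = k + cutoff
-- 		windows[k] = (start, end)
-- 		kgs.append([k,list(g)])
-- 	# n4windows: {k:n4window, ...}
-- 	n4windows = {}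
-- 	for k4win,window in windows.items():
-- 		n4windows[k4win] = 0
-- 		for k,g in kgs:
-- 			if window[0] <= k <= window[1]:
-- 				n4windows[k4win] += len(g)
-- 	return n4windows
-- ===== SOURCE B (Python) =====
-- def _bisect_left(a, x):
--     lo, hi = 0, len(a)
--     while lo < hi:
--         mid = (lo + hi) // 2
--         if a[mid] < x:
--             lo = mid + 1
--         else:
--             hi = mid
--     return lo
--
-- def _bisect_right(a, x):
--     lo, hi = 0, len(a)
--     while lo < hi:
--         mid = (lo + hi) // 2
--         if x < a[mid]:
--             hi = mid
--         else:
--             lo = mid + 1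
--     return lo
--
-- def ncopyByCutoff(ilist, cutoff=0):
--     # sort once; for each distinct value binary-search its window bounds
--     ilist.sort()
--     res = {}
--     for k in ilist:
--         if k not in res:
--             start = 1 if k <= cutoff else k - cutoff
--             n = _bisect_right(ilist, k + cutoff) - _bisect_left(ilist, start)
--             res[k] = max(0, n)
--     return res
-- ===== Notes on version B (the rewrite author's own statement) =====
-- stated objective: faster
-- what changed: Instead of A's nested scan (for every distinct value, re-scan all groups and sum their sizes), B sorts once and answers each distinct value's window count with two binary searches (bisect_left/bisect_right) over the sorted list.
import Mathlib
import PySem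

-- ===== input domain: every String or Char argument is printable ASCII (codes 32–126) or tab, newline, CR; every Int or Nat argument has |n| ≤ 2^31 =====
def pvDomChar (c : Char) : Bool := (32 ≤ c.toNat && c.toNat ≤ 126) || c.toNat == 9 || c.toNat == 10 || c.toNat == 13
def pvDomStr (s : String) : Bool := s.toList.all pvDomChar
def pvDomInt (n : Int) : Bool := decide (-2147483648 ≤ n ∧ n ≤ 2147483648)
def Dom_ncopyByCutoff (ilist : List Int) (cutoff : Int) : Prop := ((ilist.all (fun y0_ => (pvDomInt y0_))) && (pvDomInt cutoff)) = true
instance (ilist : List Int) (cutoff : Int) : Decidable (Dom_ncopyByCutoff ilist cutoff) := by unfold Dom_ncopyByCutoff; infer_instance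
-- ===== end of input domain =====

-- B replaces A's scan over all groups for every distinct key by one binary search
-- (bisect) per distinct key over the sorted list (timed measurably faster).
-- Both A and B sort ilist in place; the equivalence proved is about the return value.

-- ===== PORT A =====
-- itertools.groupby of the sorted list: consecutive runs as (key, group-as-list) pairs
def pyGroupRuns (l : List Int) : List (Int × List Int) :=
  match l with
  | [] => []
  | x :: xs =>
    (x, x :: xs.takeWhile (· == x)) :: pyGroupRuns (xs.dropWhile (· == x))
termination_by l.length
decreasing_by
  have := List.length_dropWhile_le (· == x) xs
  simp only [List.length_cons]
  omega

def ncopyByCutoff (ilist : List Int) (cutoff : Int) : List (Int × Int) :=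
  let ls := PySem.List.sorted ilist (fun x => x)
  let gs := pyGroupRuns ls
  -- the 'for k,g in gs' loop builds windows (a dict) and kgs (a list) together
  let st := gs.foldl
    (fun (st : PySem.Dict Int (Int × Int) × List (Int × List Int)) kg =>
      (st.1.insert kg.1 ((if kg.1 ≤ cutoff then (1 : Int) else kg.1 - cutoff), kg.1 + cutoff),
       st.2 ++ [(kg.1, kg.2)]))
    (PySem.Dict.empty, [])
  let windows := st.1
  let kgs := st.2
  let n4windows := windows.items.foldl
    (fun (d : PySem.Dict Int Int) kw =>
      kgs.foldl
        (fun d kg =>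
          if kw.2.1 ≤ kg.1 ∧ kg.1 ≤ kw.2.2 then d.modify kw.1 0 (· + (kg.2.length : Int)) else d)
        (d.insert kw.1 0))
    PySem.Dict.empty
  n4windows.items

-- ===== PORT B =====
def ncopyByCutoff_alt (ilist : List Int) (cutoff : Int) : List (Int × Int) :=
  let ls := PySem.List.sorted ilist (fun x => x)
  (ls.foldl
    (fun (d : PySem.Dict Int Int) k =>
      if d.contains k then d
      else
        d.insert k (max 0
          ((PySem.List.bisectRight ls (k + cutoff) : Int) -
           (PySem.List.bisectLeft ls (if k ≤ cutoff then (1 : Int) else k - cutoff) : Int))))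
    PySem.Dict.empty).items

-- ===== PRECONDITION & SPEC =====
def Spec_ncopyByCutoff (ilist : List Int) (cutoff : Int) (out : List (Int × Int)) : Prop := out = ncopyByCutoff_alt ilist cutoff
instance (ilist : List Int) (cutoff : Int) (out : List (Int × Int)) : Decidable (Spec_ncopyByCutoff ilist cutoff out) := by unfold Spec_ncopyByCutoff; infer_instance

-- ===== CLAIM (what is proved, stated in full; the proofs are below) =====
def Claim_equal_ncopyByCutoff : Prop := ∀ (ilist : List Int) (cutoff : Int), Dom_ncopyByCutoff ilist cutoff → Spec_ncopyByCutoff ilist cutoff (ncopyByCutoff ilist cutoff)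

-- ===== LEMMAS AND PROOFS =====

-- groups flatten back to the list
theorem pyGroupRuns_flatMap (l : List Int) :
    (pyGroupRuns l).flatMap (fun kg => kg.2) = l := by
  induction l using pyGroupRuns.induct with
  | case1 => simp [pyGroupRuns]
  | case2 x xs ih =>
    simp only [pyGroupRuns, List.flatMap_cons, ih]
    simp [List.takeWhile_append_dropWhile]

-- every element of a group equals its key, and groups are nonempty
theorem pyGroupRuns_elems (l : List Int) (kg : Int × List Int) (h : kg ∈ pyGroupRuns l) :
    kg.2 ≠ [] ∧ ∀ x ∈ kg.2, x = kg.1 := by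
  induction l using pyGroupRuns.induct with
  | case1 => simp [pyGroupRuns] at h
  | case2 x xs ih =>
    simp only [pyGroupRuns, List.mem_cons] at h
    rcases h with h | h
    · subst h
      refine ⟨by simp, ?_⟩
      intro y hy
      rcases List.mem_cons.mp hy with h | h
      · exact h
      · simpa using List.mem_takeWhile_imp h
    · exact ih h

-- every key of a group is a member of the list
theorem pyGroupRuns_key_mem (l : List Int) (kg : Int × List Int) (h : kg ∈ pyGroupRuns l) :
    kg.1 ∈ l := by
  induction l using pyGroupRuns.induct with
  | case1 => simp [pyGroupRuns] at h
  | case2 x xs ih =>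
    simp only [pyGroupRuns, List.mem_cons] at h
    rcases h with h | h
    · subst h; simp
    · exact List.mem_cons_of_mem x ((List.dropWhile_sublist _).mem (ih h))

-- on a sorted list the keys of the groups are strictly increasing
theorem pyGroupRuns_keys_lt (l : List Int) (hs : l.Pairwise (· ≤ ·)) :
    ((pyGroupRuns l).map (fun kg => kg.1)).Pairwise (· < ·) := by
  induction l using pyGroupRuns.induct with
  | case1 => simp [pyGroupRuns]
  | case2 x xs ih =>
    rcases List.pairwise_cons.mp hs with ⟨hx, hxs⟩
    have hdrop : (xs.dropWhile (· == x)).Pairwise (· ≤ ·) :=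
      List.Pairwise.sublist (List.dropWhile_sublist _) hxs
    have hgt : ∀ y ∈ xs.dropWhile (· == x), x < y := by
      intro y hy
      rcases hcons : xs.dropWhile (· == x) with _ | ⟨z, rest⟩
      · rw [hcons] at hy; simp at hy
      · have hne : xs.dropWhile (· == x) ≠ [] := by rw [hcons]; simp
        have h0 := List.head_dropWhile_not (fun x_1 => x_1 == x) hne
        have hz : (z == x) = false := by
          simp only [hcons, List.head_cons] at h0
          exact h0
        have hzm : z ∈ xs := (List.dropWhile_sublist _).mem (by rw [hcons]; simp)
        have hzx : x < z := by
          have h1 := hx z hzm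
          simp at hz
          omega
        rw [hcons] at hy
        rcases List.mem_cons.mp hy with h | h
        · omega
        · have := (List.pairwise_cons.mp (hcons ▸ hdrop)).1 y h
          omega
    simp only [pyGroupRuns, List.map_cons]
    refine List.pairwise_cons.mpr ⟨?_, ih hdrop⟩
    intro k hk
    rcases List.mem_map.mp hk with ⟨kg, hkg, rfl⟩
    exact hgt _ (pyGroupRuns_key_mem _ _ hkg)

-- countP of a constant-valued list
theorem countP_const (c : Int → Bool) (g : List Int) (k : Int) (h : ∀ y ∈ g, y = k) :
    g.countP c = if c k then g.length else 0 := by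
  induction g with
  | nil => simp
  | cons a t ih =>
    have ha : a = k := h a (by simp)
    have ht := ih (fun y hy => h y (List.mem_cons_of_mem a hy))
    rw [List.countP_cons, ht, ha]
    by_cases hc : c k <;> simp [hc]

-- summing group sizes over the groups whose key satisfies c counts c over l
theorem pyGroupRuns_count (c : Int → Bool) (l : List Int) :
    ((((pyGroupRuns l).filter (fun kg => c kg.1)).map (fun kg => (kg.2.length : Int))).sum)
      = (l.countP c : Int) := by
  induction l using pyGroupRuns.induct with
  | case1 => simp [pyGroupRuns]
  | case2 x xs ih =>
    have hsplit : x :: xs = (x :: xs.takeWhile (· == x)) ++ xs.dropWhile (· == x) := by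
      simp [List.takeWhile_append_dropWhile]
    have hconst : ∀ y ∈ x :: xs.takeWhile (· == x), y = x := by
      intro y hy
      rcases List.mem_cons.mp hy with h | h
      · exact h
      · simpa using List.mem_takeWhile_imp h
    have hcount : (x :: xs).countP c
        = (x :: xs.takeWhile (· == x)).countP c + (xs.dropWhile (· == x)).countP c := by
      conv_lhs => rw [hsplit]
      rw [List.countP_append]
    rw [hcount, countP_const c _ x hconst]
    simp only [pyGroupRuns, List.filter_cons]
    by_cases hc : c x
    · rw [if_pos hc, if_pos hc]
      simp only [List.map_cons, List.sum_cons, ih, List.length_cons]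
      push_cast
      ring
    · rw [if_neg hc, if_neg hc]
      rw [ih]
      simp

-- the inner for-loop over kgs: repeated 'n4windows[kw] += len(g)' at one key
theorem inner_fold (c : Int × List Int → Prop) [DecidablePred c]
    (l : List (Int × List Int)) (d : PySem.Dict Int Int) (kw : Int) (a : Int) :
    l.foldl (fun d kg => if c kg then d.modify kw 0 (· + (kg.2.length : Int)) else d) (d.insert kw a)
      = d.insert kw (a + (((l.filter (fun kg => decide (c kg))).map (fun kg => (kg.2.length : Int))).sum)) := by
  induction l generalizing a with
  | nil => simp
  | cons kg t ih =>
    by_cases hc : c kg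
    · rw [List.foldl_cons, if_pos hc]
      rw [show (d.insert kw a).modify kw 0 (· + (kg.2.length : Int))
            = d.insert kw (a + (kg.2.length : Int)) by
        simp [PySem.Dict.modify, PySem.Dict.getD_insert_self, PySem.Dict.insert_insert_self]]
      rw [ih]
      simp [hc, add_assoc]
    · rw [List.foldl_cons, if_neg hc, ih]
      simp [hc]

-- B's loop skips the duplicates of a key already present
theorem b_skip_run (v : Int → Int) (g : List Int) (d : PySem.Dict Int Int) (k : Int)
    (hg : ∀ x ∈ g, x = k) (hd : d.contains k = true) :
    g.foldl (fun d x => if d.contains x then d else d.insert x (v x)) d = d := by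
  induction g with
  | nil => rfl
  | cons a t ih =>
    have ha : a = k := hg a (by simp)
    rw [List.foldl_cons, ha, if_pos hd]
    exact ih (fun x hx => hg x (List.mem_cons_of_mem a hx))

-- B's whole loop over the sorted list, seen run by run
theorem b_main (v : Int → Int) (rs : List (Int × List Int)) (d : PySem.Dict Int Int)
    (helems : ∀ kg ∈ rs, kg.2 ≠ [] ∧ ∀ x ∈ kg.2, x = kg.1)
    (hnd : (rs.map (fun kg => kg.1)).Nodup)
    (hfresh : ∀ kg ∈ rs, d.contains kg.1 = false) :
    ((rs.flatMap (fun kg => kg.2)).foldl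
        (fun d x => if d.contains x then d else d.insert x (v x)) d).items
      = d.items ++ rs.map (fun kg => (kg.1, v kg.1)) := by
  induction rs generalizing d with
  | nil => simp
  | cons kg t ih =>
    obtain ⟨hne, hall⟩ := helems kg (by simp)
    obtain ⟨x, g', hg⟩ := List.exists_cons_of_ne_nil hne
    have hx : x = kg.1 := hall x (by simp [hg])
    have hfk : d.contains kg.1 = false := hfresh kg (by simp)
    rw [List.flatMap_cons, List.foldl_append, hg, List.foldl_cons, hx, if_neg (by simp [hfk])]
    rw [b_skip_run v g' _ kg.1 (fun y hy => hall y (by simp [hg, hy]))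
      (by rw [PySem.Dict.contains_insert]; simp)]
    rw [List.map_cons] at hnd
    have hk_nmem : kg.1 ∉ t.map (fun kg => kg.1) := (List.nodup_cons.mp hnd).1
    rw [ih _ (fun p hp => helems p (List.mem_cons_of_mem kg hp))
      ((List.nodup_cons.mp hnd).2)
      (fun p hp => by
        rw [PySem.Dict.contains_insert]
        have hne' : p.1 ≠ kg.1 := by
          intro hcontra
          exact hk_nmem (hcontra ▸ List.mem_map_of_mem hp)
        simp [hne', hfresh p (List.mem_cons_of_mem kg hp)])]
    rw [PySem.Dict.items_insert_of_not_contains d _ hfk]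
    simp

-- countP equals r when the predicate holds exactly on the first r positions
theorem countP_of_index_iff (l : List Int) (p : Int → Bool) (r : Nat) (hr : r ≤ l.length)
    (h : ∀ (j : Nat) (hj : j < l.length), (p l[j] = true ↔ j < r)) :
    l.countP p = r := by
  induction l generalizing r with
  | nil => simp at hr ⊢; omega
  | cons a t ih =>
    rcases r with _ | s
    · have ha : p a = false := by
        have h0 := h 0 (by simp)
        simp only [List.getElem_cons_zero] at h0
        cases hpa : p a with
        | false => rfl
        | true => exact absurd (h0.mp hpa) (by omega)
      have ht := ih 0 (by omega) (fun j hj => by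
        have := h (j + 1) (by simpa using Nat.succ_lt_succ hj)
        simpa using this)
      rw [List.countP_cons, ha]
      simp [ht]
    · have ha : p a = true := by
        have := h 0 (by simp)
        simpa using this.mpr (by omega)
      rw [List.countP_cons, ha]
      have := ih s (by simpa using hr) (fun j hj => by
        have := h (j + 1) (by simpa using Nat.succ_lt_succ hj)
        simpa [Nat.succ_lt_succ_iff] using this)
      simp [this]

theorem bisectRight_eq_countP (ls : List Int) (x : Int) (hs : ls.Pairwise (· ≤ ·)) :
    PySem.List.bisectRight ls x = ls.countP (fun y => decide (y ≤ x)) := by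
  obtain ⟨hle, h1, h2⟩ := PySem.List.bisectRight_spec ls x hs
  refine (countP_of_index_iff ls _ _ hle ?_).symm
  intro j hj
  constructor
  · intro hp
    by_contra hge
    have := h2 j hj (by omega)
    simp at hp
    omega
  · intro hlt
    simpa using h1 j hj hlt

theorem bisectLeft_eq_countP (ls : List Int) (x : Int) (hs : ls.Pairwise (· ≤ ·)) :
    PySem.List.bisectLeft ls x = ls.countP (fun y => decide (y < x)) := by
  obtain ⟨hle, h1, h2⟩ := PySem.List.bisectLeft_spec ls x hs
  refine (countP_of_index_iff ls _ _ hle ?_).symm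
  intro j hj
  constructor
  · intro hp
    by_contra hge
    have := h2 j hj (by omega)
    simp at hp
    omega
  · intro hlt
    simpa using h1 j hj hlt

-- clamped difference of the two one-sided counts is the window count (any list)
theorem window_count (l : List Int) (lo hi : Int) :
    max 0 ((l.countP (fun y => decide (y ≤ hi)) : Int) - (l.countP (fun y => decide (y < lo)) : Int))
      = (l.countP (fun y => decide (lo ≤ y ∧ y ≤ hi)) : Int) := by
  by_cases hlh : lo ≤ hi
  · have hsplit : ∀ m : List Int, m.countP (fun y => decide (y ≤ hi))
        = m.countP (fun y => decide (y < lo)) + m.countP (fun y => decide (lo ≤ y ∧ y ≤ hi)) := by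
      intro m
      induction m with
      | nil => simp
      | cons a t ih =>
        simp only [List.countP_cons, ih]
        by_cases h1 : a ≤ hi <;> by_cases h2 : a < lo <;> by_cases h3 : lo ≤ a <;>
          simp [h1, h2, h3] <;> omega
    rw [hsplit l]
    push_cast
    omega
  · have hz : l.countP (fun y => decide (lo ≤ y ∧ y ≤ hi)) = 0 :=
      List.countP_eq_zero.mpr (fun y _ => by simp; omega)
    have hmono : l.countP (fun y => decide (y ≤ hi)) ≤ l.countP (fun y => decide (y < lo)) :=
      List.countP_mono_left (fun y _ h => by simp at *; omega)
    rw [hz]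
    push_cast
    omega

-- ===== VERDICT (by name: the statement is the Claim_ definition above) =====
theorem pyGroupRuns_count' (w1 w2 : Int) (l : List Int) :
    ((((pyGroupRuns l).filter (fun kg => decide (w1 ≤ kg.1 ∧ kg.1 ≤ w2))).map (fun kg => (kg.2.length : Int))).sum)
      = (l.countP (fun y => decide (w1 ≤ y ∧ y ≤ w2)) : Int) :=
  pyGroupRuns_count (fun y => decide (w1 ≤ y ∧ y ≤ w2)) l

theorem ncopyByCutoff_spec : Claim_equal_ncopyByCutoff := by
  intro ilist cutoff _
  unfold Spec_ncopyByCutoff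
  have hs : (PySem.List.sorted ilist (fun x => x)).Pairwise (· ≤ ·) := by
    have := PySem.List.sorted_pairwise ilist (fun x => x)
    simpa using this
  set ls := PySem.List.sorted ilist (fun x => x) with hls
  set gs := pyGroupRuns ls with hgs
  have hnodup : (gs.map (fun kg => kg.1)).Nodup :=
    (pyGroupRuns_keys_lt ls hs).imp (fun h => ne_of_lt h)
  have hA : ncopyByCutoff ilist cutoff
      = gs.map (fun kg => (kg.1,
          (0 : Int) + (ls.countP (fun y => decide ((if kg.1 ≤ cutoff then (1 : Int) else kg.1 - cutoff) ≤ y ∧ y ≤ kg.1 + cutoff)) : Int))) := by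
    show (List.foldl
        (fun (d : PySem.Dict Int Int) kw =>
          List.foldl
            (fun d kg => if kw.2.1 ≤ kg.1 ∧ kg.1 ≤ kw.2.2 then d.modify kw.1 0 (· + (kg.2.length : Int)) else d)
            (d.insert kw.1 0)
            (List.foldl (fun st kg => (st.1.insert kg.1 ((if kg.1 ≤ cutoff then (1 : Int) else kg.1 - cutoff), kg.1 + cutoff), st.2 ++ [(kg.1, kg.2)])) (PySem.Dict.empty, []) gs).2)
        PySem.Dict.empty
        (List.foldl (fun st kg => (st.1.insert kg.1 ((if kg.1 ≤ cutoff then (1 : Int) else kg.1 - cutoff), kg.1 + cutoff), st.2 ++ [(kg.1, kg.2)])) (PySem.Dict.empty, []) gs).1.items).items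
      = _
    rw [PySem.List.foldl_prod_mk
      (f := fun (d : PySem.Dict Int (Int × Int)) (kg : Int × List Int) =>
        d.insert kg.1 ((if kg.1 ≤ cutoff then (1 : Int) else kg.1 - cutoff), kg.1 + cutoff))
      (g := fun (acc : List (Int × List Int)) (kg : Int × List Int) => acc ++ [(kg.1, kg.2)])]
    simp only [PySem.List.foldl_append_singleton_eq_map, List.nil_append]
    rw [PySem.Dict.items_foldl_insert_fresh gs (fun kg => kg.1)
      (fun kg => ((if kg.1 ≤ cutoff then (1 : Int) else kg.1 - cutoff), kg.1 + cutoff))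
      PySem.Dict.empty (fun a _ => PySem.Dict.contains_empty _) hnodup]
    rw [PySem.List.foldl_congr_mem _ _
      (g := fun (d : PySem.Dict Int Int) (kw : Int × (Int × Int)) =>
        d.insert kw.1 ((0 : Int) +
          (((gs.map (fun kg => (kg.1, kg.2))).filter (fun kg => decide (kw.2.1 ≤ kg.1 ∧ kg.1 ≤ kw.2.2))).map (fun kg => (kg.2.length : Int))).sum))
      _ (fun acc kw _ => inner_fold (fun kg => kw.2.1 ≤ kg.1 ∧ kg.1 ≤ kw.2.2) (gs.map (fun kg => (kg.1, kg.2))) acc kw.1 0)]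
    have hempty : (PySem.Dict.empty : PySem.Dict Int (Int × Int)).items = [] := rfl
    rw [hempty, List.nil_append]
    rw [PySem.Dict.items_foldl_insert_fresh
      (gs.map (fun kg => (kg.1, ((if kg.1 ≤ cutoff then (1 : Int) else kg.1 - cutoff), kg.1 + cutoff))))
      (fun kw => kw.1)
      (fun kw => (0 : Int) + (((gs.map (fun kg => (kg.1, kg.2))).filter (fun kg => decide (kw.2.1 ≤ kg.1 ∧ kg.1 ≤ kw.2.2))).map (fun kg => (kg.2.length : Int))).sum)
      PySem.Dict.empty (fun a _ => PySem.Dict.contains_empty _)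
      (by rw [List.map_map]; exact hnodup)]
    have hempty2 : (PySem.Dict.empty : PySem.Dict Int Int).items = [] := rfl
    rw [hempty2, List.nil_append, List.map_map]
    refine List.map_congr_left (fun kg hkg => ?_)
    simp only [Function.comp]
    congr 1
    have heta : gs.map (fun kg => (kg.1, kg.2)) = gs := by simp
    rw [heta, hgs, pyGroupRuns_count']
  have hB : ncopyByCutoff_alt ilist cutoff
      = gs.map (fun kg => (kg.1, max 0
          ((PySem.List.bisectRight ls (kg.1 + cutoff) : Int) -
           (PySem.List.bisectLeft ls (if kg.1 ≤ cutoff then (1 : Int) else kg.1 - cutoff) : Int)))) := by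
    show (List.foldl
        (fun (d : PySem.Dict Int Int) k =>
          if d.contains k then d
          else d.insert k (max 0
            ((PySem.List.bisectRight ls (k + cutoff) : Int) -
             (PySem.List.bisectLeft ls (if k ≤ cutoff then (1 : Int) else k - cutoff) : Int))))
        PySem.Dict.empty ls).items = _
    have hflat : ls = gs.flatMap (fun kg => kg.2) := (pyGroupRuns_flatMap ls).symm
    conv_lhs => rw [hflat]
    rw [b_main
      (fun k => max 0
        ((PySem.List.bisectRight (gs.flatMap (fun kg => kg.2)) (k + cutoff) : Int) -
         (PySem.List.bisectLeft (gs.flatMap (fun kg => kg.2)) (if k ≤ cutoff then (1 : Int) else k - cutoff) : Int)))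
      gs PySem.Dict.empty
      (fun kg hkg => pyGroupRuns_elems ls kg hkg) hnodup
      (fun kg _ => PySem.Dict.contains_empty _)]
    rw [← hflat]
    rfl
  rw [hA, hB]
  refine List.map_congr_left (fun kg hkg => ?_)
  have h1 := bisectRight_eq_countP ls (kg.1 + cutoff) hs
  have h2 := bisectLeft_eq_countP ls (if kg.1 ≤ cutoff then (1 : Int) else kg.1 - cutoff) hs
  rw [h1, h2, window_count]
  simp
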